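-- pv_equiv track=rewrite | github.com/bergeramit/ips2whitelist | whitelist_generator.py | generate_byte_mask_and_updated_value
-- ===== SOURCE A (Python) =====
-- def generate_byte_mask_and_updated_value(size_in_bits, offset_in_bits, value):
--     byte_mask = []
--     offset_in_byte = int(offset_in_bits) % 8
--     end_offset_in_byte = offset_in_byte + size_in_bits
--     for i in range(8):
--         byte_mask.append('1' if offset_in_byte <= i < end_offset_in_byte else '0')
--
--     byte_mask = int("".join(byte_mask), 2)
--     shift_value_amount = 8 - end_offset_in_byte
--     value = int(value) << shift_value_amount
--     return byte_mask, value
-- ===== SOURCE B (Python) =====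
-- def generate_byte_mask_and_updated_value(size_in_bits, offset_in_bits, value):
--     offset = int(offset_in_bits) % 8
--     end = offset + size_in_bits
--     byte_mask = 0 if size_in_bits <= 0 else ((1 << size_in_bits) - 1) << (8 - end)
--     return byte_mask, int(value) << (8 - end)
-- ===== Notes on version B (the rewrite author's own statement) =====
-- stated objective: simpler
-- what changed: Replaced the 8-iteration loop that builds a '0'/'1' string and re-parses it with int(.,2) by a closed-form bit computation: mask = ((1 << size) - 1) << (8 - end) when size > 0, else 0.
import Mathlib
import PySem

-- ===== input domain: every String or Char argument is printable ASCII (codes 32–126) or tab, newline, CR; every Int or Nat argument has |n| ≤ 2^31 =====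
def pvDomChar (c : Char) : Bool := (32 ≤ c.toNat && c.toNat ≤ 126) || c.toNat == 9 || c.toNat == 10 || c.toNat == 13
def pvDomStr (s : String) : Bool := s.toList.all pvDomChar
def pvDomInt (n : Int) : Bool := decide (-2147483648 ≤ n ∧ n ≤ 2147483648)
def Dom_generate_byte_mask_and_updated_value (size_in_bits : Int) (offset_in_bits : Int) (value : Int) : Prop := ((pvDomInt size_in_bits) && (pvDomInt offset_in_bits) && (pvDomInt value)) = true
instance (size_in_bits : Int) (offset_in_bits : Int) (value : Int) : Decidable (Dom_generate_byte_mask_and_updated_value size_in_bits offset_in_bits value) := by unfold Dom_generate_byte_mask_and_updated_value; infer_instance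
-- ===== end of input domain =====

-- B replaces A's 8-iteration string-building loop + int(·,2) parse by direct bit arithmetic (objective: simpler).


-- ===== PORT A =====
-- int(s, 2) on a string of '0'/'1' chars, ported by hand (exact for such strings): fold acc*2 + bit
def pvParseBin (bits : List Char) : Int :=
  bits.foldl (fun acc c => acc * 2 + (if c = '1' then 1 else 0)) 0

def generate_byte_mask_and_updated_value (size_in_bits : Int) (offset_in_bits : Int) (value : Int) : Int × Int :=
  let offset_in_byte := PySem.Int.mod offset_in_bits 8
  let end_offset_in_byte := offset_in_byte + size_in_bits
  -- for i in range(8): append '1'/'0'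
  let bits : List Char := (PySem.List.pyRange 0 8 1).map
    (fun i => if offset_in_byte ≤ i ∧ i < end_offset_in_byte then '1' else '0')
  let byte_mask := pvParseBin bits
  let shift_value_amount := 8 - end_offset_in_byte
  -- value << shift_value_amount; Python raises ValueError when the shift is negative — excluded by Pre_
  (byte_mask, value * 2 ^ shift_value_amount.toNat)

-- ===== PORT B =====
def generate_byte_mask_and_updated_value_alt (size_in_bits : Int) (offset_in_bits : Int) (value : Int) : Int × Int :=
  let offset := PySem.Int.mod offset_in_bits 8
  let e := offset + size_in_bits
  let byte_mask : Int := if size_in_bits ≤ 0 then 0 else (2 ^ size_in_bits.toNat - 1) * 2 ^ (8 - e).toNat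
  (byte_mask, value * 2 ^ (8 - e).toNat)

-- ===== PRECONDITION & SPEC =====
-- Pre_ excludes exactly the inputs where Python A raises ValueError (negative shift count at
-- 'value << (8 - end)'), i.e. offset_in_bits % 8 + size_in_bits > 8; B raises there too.
def Pre_generate_byte_mask_and_updated_value (size_in_bits : Int) (offset_in_bits : Int) (value : Int) : Prop :=
  PySem.Int.mod offset_in_bits 8 + size_in_bits ≤ 8
instance (size_in_bits : Int) (offset_in_bits : Int) (value : Int) : Decidable (Pre_generate_byte_mask_and_updated_value size_in_bits offset_in_bits value) := by unfold Pre_generate_byte_mask_and_updated_value; infer_instance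
def pvWitness_generate_byte_mask_and_updated_value : Int × Int × Int := (3, 10, 5)
def Spec_generate_byte_mask_and_updated_value (size_in_bits : Int) (offset_in_bits : Int) (value : Int) (out : Int × Int) : Prop := out = generate_byte_mask_and_updated_value_alt size_in_bits offset_in_bits value
instance (size_in_bits : Int) (offset_in_bits : Int) (value : Int) (out : Int × Int) : Decidable (Spec_generate_byte_mask_and_updated_value size_in_bits offset_in_bits value out) := by unfold Spec_generate_byte_mask_and_updated_value; infer_instance

-- ===== CLAIM (what is proved, stated in full; the proofs are below) =====
def Claim_equal_generate_byte_mask_and_updated_value : Prop := ∀ (size_in_bits : Int) (offset_in_bits : Int) (value : Int), Dom_generate_byte_mask_and_updated_value size_in_bits offset_in_bits value → Pre_generate_byte_mask_and_updated_value size_in_bits offset_in_bits value → Spec_generate_byte_mask_and_updated_value size_in_bits offset_in_bits value (generate_byte_mask_and_updated_value size_in_bits offset_in_bits value)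

-- ===== LEMMAS AND PROOFS =====

theorem pyRange08 : PySem.List.pyRange 0 8 1 = [0, 1, 2, 3, 4, 5, 6, 7] := by decide

theorem mod8_bounds (o : Int) : 0 ≤ PySem.Int.mod o 8 ∧ PySem.Int.mod o 8 < 8 := by
  unfold PySem.Int.mod
  have h := Int.fmod_eq_emod (a := o) (b := 8)
  norm_num at h
  omega

-- The parsed mask of A's loop, as a function of off = offset % 8 and size.
theorem maskA_eq (off size : Int) (h0 : 0 ≤ off) (h8 : off < 8) (hpre : off + size ≤ 8) :
    pvParseBin ((PySem.List.pyRange 0 8 1).map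
      (fun i => if off ≤ i ∧ i < off + size then '1' else '0')) =
    (if size ≤ 0 then 0 else (2 ^ size.toNat - 1) * 2 ^ (8 - (off + size)).toNat) := by
  by_cases hs : size ≤ 0
  · rw [if_pos hs, pyRange08]
    rw [List.map_congr_left (g := fun _ => '0')
      (by intro i hi; fin_cases hi <;> exact if_neg (by omega))]
    decide
  · rw [if_neg hs, pyRange08]
    interval_cases off <;>
      (have h1 : 1 ≤ size := by omega
       have h2 : size ≤ 8 := by omega
       interval_cases size <;> first | (exfalso; omega) | decide)

theorem generate_spec_aux (size_in_bits offset_in_bits value : Int)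
    (hpre : PySem.Int.mod offset_in_bits 8 + size_in_bits ≤ 8) :
    generate_byte_mask_and_updated_value size_in_bits offset_in_bits value =
    generate_byte_mask_and_updated_value_alt size_in_bits offset_in_bits value := by
  obtain ⟨h0, h8⟩ := mod8_bounds offset_in_bits
  unfold generate_byte_mask_and_updated_value generate_byte_mask_and_updated_value_alt
  exact Prod.ext (maskA_eq _ _ h0 h8 hpre) rfl

-- ===== VERDICT (by name: the statement is the Claim_ definition above) =====
theorem generate_byte_mask_and_updated_value_spec : Claim_equal_generate_byte_mask_and_updated_value := by
  intro s o v _ hpre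
  exact generate_spec_aux s o v hpre
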